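-- pv_equiv track=rewrite | github.com/pypi-data/pypi-mirror-255 | packages/pathogen-decision-engine/pathogen_decision_engine-1.1.1-py3-none-any.whl/pathogen_decision_engine/pathogen_decision_engine.py | postprocess_inference
-- ===== SOURCE A (Python) =====
-- def postprocess_inference(rule_set_out):
--     output_set = set([label for result, label in rule_set_out if result is True])
--     output_filtering = {'Pathogenic': [{'Pathogenic', 'Likely Pathogenic'},
--                                        {'Pathogenic'}],
--                         'Likely Pathogenic': [{'Likely Pathogenic'}],
--                         'Likely Benign': [{'Likely Benign'}],
--                         'Benign': [{'Benign', 'Likely Benign'},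
--                                    {'Benign'}]
--                         }
--     output_label = "Uncertain significance"
--     for label in output_filtering:
--         if output_set in output_filtering[label]:
--             output_label = label
--             break
--
--     return output_label, output_set
-- ===== SOURCE B (Python) =====
-- def postprocess_inference(rule_set_out):
--     # One pass: build the set while tracking a membership flag per known label
--     # plus an "unknown label present" flag, then decide the label by flag logic
--     # instead of comparing the set against candidate sets.
--     output_set = set()
--     pa = lp = lb = be = other = False
--     for result, label in rule_set_out:
--         if result is True:
--             output_set.add(label)
--             if label == 'Pathogenic':
--                 pa = True
--             elif label == 'Likely Pathogenic':
--                 lp = True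
--             elif label == 'Likely Benign':
--                 lb = True
--             elif label == 'Benign':
--                 be = True
--             else:
--                 other = True
--     if other:
--         output_label = "Uncertain significance"
--     elif pa and not lb and not be:
--         output_label = "Pathogenic"
--     elif lp and not pa and not lb and not be:
--         output_label = "Likely Pathogenic"
--     elif lb and not pa and not lp and not be:
--         output_label = "Likely Benign"
--     elif be and not pa and not lp:
--         output_label = "Benign"
--     else:
--         output_label = "Uncertain significance"
--     return output_label, output_set
-- ===== Notes on version B (the rewrite author's own statement) =====
-- stated objective: alternative
-- what changed: Replaces A's two-phase build-the-set-then-compare-it-against-six-candidate-sets scan with a single pass that tracks one membership flag per known label plus an unknown-label flag, and decides the label by boolean flag logic instead of set comparisons.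
import Mathlib
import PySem

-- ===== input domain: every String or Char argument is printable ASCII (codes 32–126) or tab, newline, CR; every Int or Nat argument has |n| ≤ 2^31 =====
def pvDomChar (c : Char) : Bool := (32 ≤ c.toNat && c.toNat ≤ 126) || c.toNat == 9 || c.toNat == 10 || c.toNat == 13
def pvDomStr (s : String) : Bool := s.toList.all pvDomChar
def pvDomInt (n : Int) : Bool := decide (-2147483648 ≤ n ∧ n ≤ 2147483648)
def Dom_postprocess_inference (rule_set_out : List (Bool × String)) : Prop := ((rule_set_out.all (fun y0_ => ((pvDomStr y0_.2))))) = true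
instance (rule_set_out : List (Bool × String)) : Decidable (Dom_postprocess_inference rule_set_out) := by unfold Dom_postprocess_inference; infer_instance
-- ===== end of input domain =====

-- B replaces A's set-comparison scan (compare output_set against candidate sets per label)
-- by a single pass that tracks one membership flag per known label plus an unknown-label
-- flag, deciding the label by flag logic (alternative decomposition, same cost).

-- ===== PORT A =====
-- the 'for label in output_filtering: if output_set in output_filtering[label]: … break' loop;
-- Python's 'in' on a list of sets compares sets by equality, ported exactly via PySem.Set.equal
def pvLoopA (s : PySem.Set String) : List (String × List (List String)) → String
  | [] => "Uncertain significance"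
  | (label, sets) :: rest =>
      if sets.any (fun t => PySem.Set.equal s t) then label else pvLoopA s rest

def postprocess_inference (rule_set_out : List (Bool × String)) : String × List String :=
  let output_set : PySem.Set String :=
    PySem.Set.ofList (rule_set_out.filterMap (fun p => if p.1 then some p.2 else none))
  let output_filtering : List (String × List (List String)) :=
    [("Pathogenic", [["Pathogenic", "Likely Pathogenic"], ["Pathogenic"]]),
     ("Likely Pathogenic", [["Likely Pathogenic"]]),
     ("Likely Benign", [["Likely Benign"]]),
     ("Benign", [["Benign", "Likely Benign"], ["Benign"]])]
  (pvLoopA output_set output_filtering, output_set)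

-- ===== PORT B =====
-- B's loop body: add the label to the set and update the five flags
def pvStepB (st : PySem.Set String × Bool × Bool × Bool × Bool × Bool) (p : Bool × String) :
    PySem.Set String × Bool × Bool × Bool × Bool × Bool :=
  if p.1 then
    let s := PySem.Set.add st.1 p.2
    if p.2 = "Pathogenic" then (s, true, st.2.2.1, st.2.2.2.1, st.2.2.2.2.1, st.2.2.2.2.2)
    else if p.2 = "Likely Pathogenic" then (s, st.2.1, true, st.2.2.2.1, st.2.2.2.2.1, st.2.2.2.2.2)
    else if p.2 = "Likely Benign" then (s, st.2.1, st.2.2.1, true, st.2.2.2.2.1, st.2.2.2.2.2)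
    else if p.2 = "Benign" then (s, st.2.1, st.2.2.1, st.2.2.2.1, true, st.2.2.2.2.2)
    else (s, st.2.1, st.2.2.1, st.2.2.2.1, st.2.2.2.2.1, true)
  else st

-- B's final if/elif chain deciding the label from the five flags
def pvLabelB (pa lp lb be other : Bool) : String :=
  if other then "Uncertain significance"
  else if pa && !lb && !be then "Pathogenic"
  else if lp && !pa && !lb && !be then "Likely Pathogenic"
  else if lb && !pa && !lp && !be then "Likely Benign"
  else if be && !pa && !lp then "Benign"
  else "Uncertain significance"

def postprocess_inference_alt (rule_set_out : List (Bool × String)) : String × List String :=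
  let st := rule_set_out.foldl pvStepB (PySem.Set.empty, false, false, false, false, false)
  (pvLabelB st.2.1 st.2.2.1 st.2.2.2.1 st.2.2.2.2.1 st.2.2.2.2.2, st.1)

-- ===== PRECONDITION & SPEC =====
def Spec_postprocess_inference (rule_set_out : List (Bool × String)) (out : String × List String) : Prop := out = postprocess_inference_alt rule_set_out
instance (rule_set_out : List (Bool × String)) (out : String × List String) : Decidable (Spec_postprocess_inference rule_set_out out) := by unfold Spec_postprocess_inference; infer_instance

-- ===== CLAIM (what is proved, stated in full; the proofs are below) =====
def Claim_equal_postprocess_inference : Prop := ∀ (rule_set_out : List (Bool × String)), Dom_postprocess_inference rule_set_out → Spec_postprocess_inference rule_set_out (postprocess_inference rule_set_out)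

-- ===== LEMMAS AND PROOFS =====

-- "label is none of the four known ones"
def pvOther (x : String) : Bool := !(x == "Pathogenic" || x == "Likely Pathogenic" || x == "Likely Benign" || x == "Benign")

def pvFlags (s : List String) : Bool × Bool × Bool × Bool × Bool :=
  (s.contains "Pathogenic", s.contains "Likely Pathogenic", s.contains "Likely Benign",
   s.contains "Benign", s.any pvOther)

theorem pvFlags_add (s : List String) (x : String) :
    pvFlags (PySem.Set.add s x) =
      ((s.contains "Pathogenic" || x == "Pathogenic"),
       (s.contains "Likely Pathogenic" || x == "Likely Pathogenic"),
       (s.contains "Likely Benign" || x == "Likely Benign"),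
       (s.contains "Benign" || x == "Benign"),
       (s.any pvOther || pvOther x)) := by
  have hc : ∀ y : String, List.contains (PySem.Set.add s x) y = (s.contains y || x == y) := by
    intro y
    unfold PySem.Set.add
    cases hxy : (x == y)
    · have hne : y ≠ x := fun h => by subst h; simp at hxy
      split_ifs with h <;> simp [List.mem_append, hne]
    · have hxy' : x = y := by simpa using hxy
      subst hxy'
      split_ifs with h <;>
        simp_all [List.mem_append]
  have ha : List.any (PySem.Set.add s x) pvOther = (s.any pvOther || pvOther x) := by
    unfold PySem.Set.add
    split_ifs with h
    · cases ho : pvOther x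
      · simp
      · have hxmem : x ∈ s := by simpa [PySem.Set.contains_iff] using h
        simp only [Bool.or_true]
        exact List.any_eq_true.mpr ⟨x, hxmem, ho⟩
    · simp [List.any_append]
  unfold pvFlags
  rw [hc, hc, hc, hc, ha]

theorem pvFoldB (rs : List (Bool × String)) (s : List String) :
    rs.foldl pvStepB (s, pvFlags s) =
      (let S := rs.foldl (fun a p => if p.1 then PySem.Set.add a p.2 else a) s
       (S, pvFlags S)) := by
  induction rs generalizing s with
  | nil => rfl
  | cons p rest ih =>
    simp only [List.foldl_cons]
    by_cases hp : p.1
    · have hstep : pvStepB (s, pvFlags s) p = (PySem.Set.add s p.2, pvFlags (PySem.Set.add s p.2)) := by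
        rw [pvFlags_add]
        simp only [pvStepB, pvFlags, hp, if_true]
        by_cases h1 : p.2 = "Pathogenic"
        · simp [pvOther, h1]
        · by_cases h2 : p.2 = "Likely Pathogenic"
          · simp [pvOther, h2]
          · by_cases h3 : p.2 = "Likely Benign"
            · simp [pvOther, h3]
            · by_cases h4 : p.2 = "Benign"
              · simp [pvOther, h4]
              · simp [pvOther, h1, h2, h3, h4]
      rw [hstep, ih, if_pos hp]
    · simp only [hp]
      rw [show pvStepB (s, pvFlags s) p = (s, pvFlags s) by unfold pvStepB; simp [hp]]
      rw [ih]
      simp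

theorem pvSet_eq (rs : List (Bool × String)) (s : List String) :
    (rs.filterMap (fun p => if p.1 then some p.2 else none)).foldl PySem.Set.add s =
      rs.foldl (fun a p => if p.1 then PySem.Set.add a p.2 else a) s := by
  induction rs generalizing s with
  | nil => rfl
  | cons p rest ih =>
    by_cases hp : p.1 <;> simp [hp, ih]

theorem pvNotOther {x : String} (h : pvOther x = false) :
    x = "Pathogenic" ∨ x = "Likely Pathogenic" ∨ x = "Likely Benign" ∨ x = "Benign" := by
  have h' := h
  simp [pvOther] at h'
  tauto

theorem pvMem_char (s : List String) (hot : s.any pvOther = false) {x : String} (hx : x ∈ s) :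
    x = "Pathogenic" ∨ x = "Likely Pathogenic" ∨ x = "Likely Benign" ∨ x = "Benign" := by
  apply pvNotOther
  by_contra h
  have hx2 : pvOther x = true := by revert h; cases pvOther x <;> simp
  have : s.any pvOther = true := List.any_eq_true.mpr ⟨x, hx, hx2⟩
  simp [this] at hot

theorem pvEqual_false (s t : List String) (ht : ∀ x ∈ t, pvOther x = false)
    (hot : s.any pvOther = true) : PySem.Set.equal s t = false := by
  cases heq : PySem.Set.equal s t
  · rfl
  · exfalso
    rw [PySem.Set.equal_iff] at heq
    obtain ⟨x, hx, hox⟩ := List.any_eq_true.mp hot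
    have hxt : x ∈ t := (heq x).mp hx
    have := ht x hxt
    simp [this] at hox

theorem pvEqual_char (s : List String) (hot : s.any pvOther = false)
    (t : List String)
    (bP bLP bLB bB : Bool)
    (h1 : "Pathogenic" ∈ t ↔ bP = true) (h2 : "Likely Pathogenic" ∈ t ↔ bLP = true)
    (h3 : "Likely Benign" ∈ t ↔ bLB = true) (h4 : "Benign" ∈ t ↔ bB = true)
    (ht : ∀ x ∈ t, pvOther x = false) :
    PySem.Set.equal s t =
      (s.contains "Pathogenic" == bP && s.contains "Likely Pathogenic" == bLP &&
       s.contains "Likely Benign" == bLB && s.contains "Benign" == bB) := by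
  rw [Bool.eq_iff_iff, PySem.Set.equal_iff]
  simp only [Bool.and_eq_true, beq_iff_eq]
  constructor
  · intro h
    refine ⟨⟨⟨?_, ?_⟩, ?_⟩, ?_⟩ <;>
      rw [Bool.eq_iff_iff] <;>
      simp only [List.contains_iff_mem] <;>
      [rw [← h1]; rw [← h2]; rw [← h3]; rw [← h4]] <;>
      exact ⟨fun hm => (h _).mp hm, fun hm => (h _).mpr hm⟩
  · rintro ⟨⟨⟨e1, e2⟩, e3⟩, e4⟩ x
    have hcont : ∀ y : String, y ∈ s ↔ s.contains y = true := by
      intro y; simp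
    constructor
    · intro hx
      rcases pvMem_char s hot hx with h | h | h | h <;> subst h
      · exact h1.mpr (by rw [← e1]; exact (hcont _).mp hx)
      · exact h2.mpr (by rw [← e2]; exact (hcont _).mp hx)
      · exact h3.mpr (by rw [← e3]; exact (hcont _).mp hx)
      · exact h4.mpr (by rw [← e4]; exact (hcont _).mp hx)
    · intro hx
      rcases pvNotOther (ht x hx) with h | h | h | h <;> subst h
      · exact (hcont _).mpr (by rw [e1]; exact h1.mp hx)
      · exact (hcont _).mpr (by rw [e2]; exact h2.mp hx)
      · exact (hcont _).mpr (by rw [e3]; exact h3.mp hx)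
      · exact (hcont _).mpr (by rw [e4]; exact h4.mp hx)

theorem pvLabel_eq (s : List String) :
    pvLoopA s
      [("Pathogenic", [["Pathogenic", "Likely Pathogenic"], ["Pathogenic"]]),
       ("Likely Pathogenic", [["Likely Pathogenic"]]),
       ("Likely Benign", [["Likely Benign"]]),
       ("Benign", [["Benign", "Likely Benign"], ["Benign"]])]
      = pvLabelB (s.contains "Pathogenic") (s.contains "Likely Pathogenic")
          (s.contains "Likely Benign") (s.contains "Benign") (s.any pvOther) := by
  cases hot : s.any pvOther with
  | true =>
    have hf : ∀ t ∈ ([["Pathogenic", "Likely Pathogenic"], ["Pathogenic"], ["Likely Pathogenic"],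
        ["Likely Benign"], ["Benign", "Likely Benign"], ["Benign"]] : List (List String)),
        PySem.Set.equal s t = false := by
      intro t htm
      apply pvEqual_false s t ?_ hot
      fin_cases htm <;> intro x hx <;> fin_cases hx <;> rfl
    simp only [pvLoopA, List.any_cons, List.any_nil]
    rw [hf _ (by simp), hf _ (by simp), hf _ (by simp), hf _ (by simp), hf _ (by simp), hf _ (by simp)]
    simp [pvLabelB]
  | false =>
    have e1 := pvEqual_char s hot ["Pathogenic", "Likely Pathogenic"] true true false false
      (by simp) (by simp) (by simp) (by simp) (by intro x hx; fin_cases hx <;> rfl)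
    have e2 := pvEqual_char s hot ["Pathogenic"] true false false false
      (by simp) (by simp) (by simp) (by simp) (by intro x hx; fin_cases hx; rfl)
    have e3 := pvEqual_char s hot ["Likely Pathogenic"] false true false false
      (by simp) (by simp) (by simp) (by simp) (by intro x hx; fin_cases hx; rfl)
    have e4 := pvEqual_char s hot ["Likely Benign"] false false true false
      (by simp) (by simp) (by simp) (by simp) (by intro x hx; fin_cases hx; rfl)
    have e5 := pvEqual_char s hot ["Benign", "Likely Benign"] false false true true
      (by simp) (by simp) (by simp) (by simp) (by intro x hx; fin_cases hx <;> rfl)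
    have e6 := pvEqual_char s hot ["Benign"] false false false true
      (by simp) (by simp) (by simp) (by simp) (by intro x hx; fin_cases hx; rfl)
    simp only [pvLoopA, List.any_cons, List.any_nil]
    rw [e1, e2, e3, e4, e5, e6]
    cases s.contains "Pathogenic" <;> cases s.contains "Likely Pathogenic" <;>
      cases s.contains "Likely Benign" <;> cases s.contains "Benign" <;>
      simp [pvLabelB]

-- ===== VERDICT (by name: the statement is the Claim_ definition above) =====
theorem postprocess_inference_spec : Claim_equal_postprocess_inference := by
  intro rs _
  unfold Spec_postprocess_inference postprocess_inference postprocess_inference_alt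
  have hfold := pvFoldB rs []
  have h0 : pvFlags ([] : List String) = (false, false, false, false, false) := by rfl
  rw [show (PySem.Set.empty : PySem.Set String) = ([] : List String) from rfl]
  rw [← h0, hfold]
  simp only [PySem.Set.ofList_eq_foldl, pvSet_eq]
  rw [pvLabel_eq]
  rfl
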